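-- pv_equiv track=rewrite | github.com/RealFaceCode/ContextBrain | contextbrain/parsers/markdown_parser.py | _build_heading_hierarchy
-- ===== SOURCE A (Python) =====
-- from typing import List, Optional, Dict, Tuple
--
-- def _build_heading_hierarchy(headings: List[Dict]) -> Dict[int, Optional[int]]:
--     """
--     Build parent-child relationships between headings.
--
--     Returns:
--         Dictionary mapping heading index to parent heading index
--     """
--     hierarchy = {}
--     heading_stack = []  # Stack to track parent headings at each level
--
--     for i, heading in enumerate(headings):
--         level = heading['level']
--
--         # Find the appropriate parent by popping headings of equal or lower level
--         while heading_stack and heading_stack[-1]['level'] >= level: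
--             heading_stack.pop()
--
--         # Set parent relationship
--         if heading_stack:
--             parent_index = heading_stack[-1]['index']
--             hierarchy[i] = parent_index
--         else:
--             hierarchy[i] = None  # Top-level heading
--
--         # Add current heading to stack
--         heading_stack.append({'level': level, 'index': i})
--
--     return hierarchy
-- ===== SOURCE B (Python) =====
-- def _build_heading_hierarchy(headings):
--     levels = [h['level'] for h in headings]
--     hierarchy = {}
--     for i, lvl in enumerate(levels):
--         parent = None
--         for j in range(i - 1, -1, -1):
--             if levels[j] < lvl:
--                 parent = j
--                 break
--         hierarchy[i] = parent
--     return hierarchy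
-- ===== Notes on version B (the rewrite author's own statement) =====
-- stated objective: alternative
-- what changed: Replaced the monotonic stack (pop-while and push per heading) by a stackless nearest-smaller-to-the-left search: for each heading, scan backward through the earlier levels for the first strictly smaller one.
import Mathlib
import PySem

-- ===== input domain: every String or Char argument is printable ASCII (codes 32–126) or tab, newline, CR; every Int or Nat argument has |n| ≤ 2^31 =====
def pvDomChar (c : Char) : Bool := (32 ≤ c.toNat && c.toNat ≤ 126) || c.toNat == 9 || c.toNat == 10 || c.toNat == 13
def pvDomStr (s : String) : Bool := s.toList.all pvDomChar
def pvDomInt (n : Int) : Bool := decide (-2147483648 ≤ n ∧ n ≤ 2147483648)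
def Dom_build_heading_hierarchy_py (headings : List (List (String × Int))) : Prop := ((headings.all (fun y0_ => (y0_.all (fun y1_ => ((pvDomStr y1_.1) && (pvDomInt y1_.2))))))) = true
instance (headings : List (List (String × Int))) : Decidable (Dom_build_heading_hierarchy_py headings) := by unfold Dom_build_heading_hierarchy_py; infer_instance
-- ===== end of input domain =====

-- B replaces A's monotonic stack by a stackless backward scan for the nearest
-- strictly-smaller level to the left (same result, O(n^2) instead of O(n)).


-- heading['level'] : first-match lookup; 0 is never used on inputs satisfying Pre_
def pvGetLevel (h : List (String × Int)) : Int :=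
  ((h.find? (fun p => p.1 == "level")).map (·.2)).getD 0

-- ===== PORT A =====
-- stack is kept top-first (Python's stack[-1] = head); the pop-while loop is dropWhile;
-- hierarchy is accumulated reversed and reversed at the end (dict insertion order i = 0,1,…)
def pvALoop (stack : List (Int × Int)) (i : Int) (rest : List (List (String × Int)))
    (acc : List (Int × Option Int)) : List (Int × Option Int) :=
  match rest with
  | [] => acc.reverse
  | h :: rs =>
    let level := pvGetLevel h
    let stack' := stack.dropWhile (fun p => p.1 ≥ level)
    let parent := stack'.head?.map (·.2)
    pvALoop ((level, i) :: stack') (i + 1) rs ((i, parent) :: acc)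

def build_heading_hierarchy_py (headings : List (List (String × Int))) : List (Int × Option Int) :=
  pvALoop [] 0 headings []

-- ===== PORT B =====
-- prevRev = earlier (index, level) pairs, most recent first; the backward scan
-- j = i-1 … 0 is find? on prevRev
def pvBLoop (prevRev : List (Int × Int)) (i : Int) (rest : List Int) : List (Int × Option Int) :=
  match rest with
  | [] => []
  | l :: rs =>
    (i, (prevRev.find? (fun p => p.2 < l)).map (·.1)) :: pvBLoop ((i, l) :: prevRev) (i + 1) rs

def build_heading_hierarchy_py_alt (headings : List (List (String × Int))) : List (Int × Option Int) :=
  pvBLoop [] 0 (headings.map pvGetLevel)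

-- ===== PRECONDITION & SPEC =====
-- Pre_ excludes headings missing the 'level' key, on which the Python A raises KeyError.
def Pre_build_heading_hierarchy_py (headings : List (List (String × Int))) : Prop :=
  ∀ h ∈ headings, "level" ∈ h.map Prod.fst
instance (headings : List (List (String × Int))) : Decidable (Pre_build_heading_hierarchy_py headings) := by unfold Pre_build_heading_hierarchy_py; infer_instance

def pvWitness_build_heading_hierarchy_py : (List (List (String × Int))) :=
  [[("level", 1)], [("level", 2)], [("level", 2)], [("level", 1)], [("level", 3)]]

def Spec_build_heading_hierarchy_py (headings : List (List (String × Int))) (out : List (Int × Option Int)) : Prop := out = build_heading_hierarchy_py_alt headings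
instance (headings : List (List (String × Int))) (out : List (Int × Option Int)) : Decidable (Spec_build_heading_hierarchy_py headings out) := by unfold Spec_build_heading_hierarchy_py; infer_instance

-- ===== CLAIM (what is proved, stated in full; the proofs are below) =====
def Claim_equal_build_heading_hierarchy_py : Prop := ∀ (headings : List (List (String × Int))), Dom_build_heading_hierarchy_py headings → Pre_build_heading_hierarchy_py headings → Spec_build_heading_hierarchy_py headings (build_heading_hierarchy_py headings)

-- ===== LEMMAS AND PROOFS =====

-- the stack A maintains, as a function of the processed (index, level) pairs (most recent first)
def pvVis : List (Int × Int) → List (Int × Int)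
  | [] => []
  | (i, l) :: ps => (l, i) :: (pvVis ps).dropWhile (fun p => p.1 ≥ l)

theorem pv_dropWhile_dropWhile {α : Type} (p q : α → Bool) (xs : List α)
    (h : ∀ x, q x = true → p x = true) :
    (xs.dropWhile q).dropWhile p = xs.dropWhile p := by
  induction xs with
  | nil => rfl
  | cons x xs ih =>
    by_cases hq : q x = true
    · simp [hq, h x hq, ih]
    · simp [List.dropWhile_cons, hq]

-- key lemma: popping the stack down below `lvl` exposes exactly the nearest
-- strictly-smaller-level entry that the backward scan finds
theorem pv_key (prevRev : List (Int × Int)) (lvl : Int) :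
    (((pvVis prevRev).dropWhile (fun p => p.1 ≥ lvl)).head?.map (·.2))
      = ((prevRev.find? (fun p => p.2 < lvl)).map (·.1)) := by
  induction prevRev with
  | nil => rfl
  | cons x ps ih =>
    obtain ⟨i, l⟩ := x
    by_cases hl : l < lvl
    · have h1 : (decide (l ≥ lvl)) = false := by simp; omega
      have h2 : (decide (l < lvl)) = true := by simpa using hl
      simp [pvVis, h1, List.find?, h2]
    · have h1 : (decide (l ≥ lvl)) = true := by simp; omega
      have h2 : (decide (l < lvl)) = false := by simpa using hl
      rw [pvVis]
      simp only [List.dropWhile_cons, h1, if_true, List.find?, h2]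
      rw [pv_dropWhile_dropWhile (fun p => p.1 ≥ lvl) (fun p => p.1 ≥ l) (pvVis ps)
        (by intro x hx; simp at hx ⊢; omega)]
      exact ih

theorem pv_loops (rest : List (List (String × Int))) :
    ∀ (prevRev : List (Int × Int)) (i : Int) (acc : List (Int × Option Int)),
    pvALoop (pvVis prevRev) i rest acc
      = acc.reverse ++ pvBLoop prevRev i (rest.map pvGetLevel) := by
  induction rest with
  | nil => intro _ _ _; simp [pvALoop, pvBLoop]
  | cons h rs ih =>
    intro prevRev i acc
    rw [pvALoop]
    show pvALoop ((pvGetLevel h, i) :: (pvVis prevRev).dropWhile (fun p => p.1 ≥ pvGetLevel h))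
        (i + 1) rs ((i, ((pvVis prevRev).dropWhile (fun p => p.1 ≥ pvGetLevel h)).head?.map (·.2)) :: acc)
      = acc.reverse ++ pvBLoop prevRev i ((h :: rs).map pvGetLevel)
    have hs : (pvGetLevel h, i) :: (pvVis prevRev).dropWhile (fun p => p.1 ≥ pvGetLevel h)
        = pvVis ((i, pvGetLevel h) :: prevRev) := rfl
    rw [hs, ih ((i, pvGetLevel h) :: prevRev) (i + 1)
        ((i, ((pvVis prevRev).dropWhile (fun p => p.1 ≥ pvGetLevel h)).head?.map (·.2)) :: acc)]
    rw [pv_key prevRev (pvGetLevel h)]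
    simp [pvBLoop]

-- ===== VERDICT (by name: the statement is the Claim_ definition above) =====
theorem build_heading_hierarchy_py_spec : Claim_equal_build_heading_hierarchy_py := by
  intro headings _ _
  unfold Spec_build_heading_hierarchy_py build_heading_hierarchy_py build_heading_hierarchy_py_alt
  have := pv_loops headings [] 0 []
  simpa [pvVis] using this
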